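-- pv_equiv track=rewrite | github.com/jcolinpatrick/kryptos | scripts/e_audit_04_cardan_aperture.py | column_extraction
-- ===== SOURCE A (Python) =====
-- from typing import Dict, List, Optional, Set, Tuple
--
-- def column_extraction(rows: List[str], col: int) -> Tuple[str, List[int]]:
--     """Extract a single column from the 2D grid."""
--     chars = []
--     positions = []
--     offset = 0
--     for row in rows:
--         if col < len(row):
--             chars.append(row[col])
--             positions.append(offset + col)
--         offset += len(row)
--     return ''.join(chars), positions
-- ===== SOURCE B (Python) =====
-- def column_extraction(rows, col):
--     """Extract a single column from the 2D grid.
--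
--     Divide and conquer: solve each half of the row list in coordinates
--     relative to that half, then shift the right half's positions by the
--     left half's total character count when combining.
--     """
--     def go(rs):
--         # returns (chars, positions relative to rs's own start, total length of rs)
--         if not rs:
--             return [], [], 0
--         if len(rs) == 1:
--             r = rs[0]
--             if col < len(r):
--                 return [r[col]], [col], len(r)
--             return [], [], len(r)
--         mid = len(rs) // 2
--         cl, pl, ll = go(rs[:mid])
--         cr, pr, lr = go(rs[mid:])
--         return cl + cr, pl + [p + ll for p in pr], ll + lr
--
--     cs, ps, _ = go(rows)
--     return ''.join(cs), ps
-- ===== Notes on version B (the rewrite author's own statement) =====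
-- stated objective: alternative
-- what changed: B replaces A's single left-to-right loop with a running offset by a divide-and-conquer recursion: it splits the row list in half, extracts each half's column in coordinates relative to that half (no global offset anywhere), and at combine time shifts the right half's positions by the left half's total character count.
import Mathlib
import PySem

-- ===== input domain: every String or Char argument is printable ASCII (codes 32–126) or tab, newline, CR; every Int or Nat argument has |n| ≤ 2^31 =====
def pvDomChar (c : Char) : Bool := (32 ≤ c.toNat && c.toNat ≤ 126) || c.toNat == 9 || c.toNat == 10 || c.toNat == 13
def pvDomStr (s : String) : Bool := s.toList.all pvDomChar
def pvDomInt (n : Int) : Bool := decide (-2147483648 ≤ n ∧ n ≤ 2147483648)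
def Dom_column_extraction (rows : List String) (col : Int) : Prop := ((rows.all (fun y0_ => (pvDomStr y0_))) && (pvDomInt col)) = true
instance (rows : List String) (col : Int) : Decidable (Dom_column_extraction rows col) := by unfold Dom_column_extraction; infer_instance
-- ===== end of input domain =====

-- B extracts the column by divide and conquer on the row list (relative positions,
-- shifted at combine time) instead of A's single loop with a running offset
-- (objective: alternative).


-- ===== PORT A =====
-- A: one loop over rows carrying (chars, positions, offset); row[col] is
-- PySem.Str.pyGet? (none = IndexError, excluded by Pre_; the none arm skips).
def column_extraction (rows : List String) (col : Int) : String × List Int :=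
  let st := rows.foldl
    (fun (acc : List Char × List Int × Int) row =>
      let (chars, positions, offset) := acc
      if col < PySem.Str.len row then
        match PySem.Str.pyGet? row col with
        | some c => (chars ++ [c], positions ++ [offset + col], offset + PySem.Str.len row)
        | none => (chars, positions, offset + PySem.Str.len row)
      else (chars, positions, offset + PySem.Str.len row))
    ([], [], 0)
  (String.ofList st.1, st.2.1)

-- ===== PORT B =====
-- B's helper go: split the rows in half, solve each half relative to its own
-- start, shift the right half's positions by the left half's total length.
def pvGoB (col : Int) : List String → List Char × List Int × Int
  | [] => ([], [], 0)
  | [r] =>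
    if col < PySem.Str.len r then
      match PySem.Str.pyGet? r col with
      | some c => ([c], [col], PySem.Str.len r)
      | none => ([], [], PySem.Str.len r)   -- Python raises here; outside Pre_
    else ([], [], PySem.Str.len r)
  | r1 :: r2 :: rest =>
    let mid := (r1 :: r2 :: rest).length / 2
    let (cl, pl, ll) := pvGoB col ((r1 :: r2 :: rest).take mid)
    let (cr, pr, lr) := pvGoB col ((r1 :: r2 :: rest).drop mid)
    (cl ++ cr, pl ++ pr.map (· + ll), ll + lr)
  termination_by rs => rs.length
  decreasing_by
    · simp [List.length_take]; omega
    · simp; omega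

def column_extraction_alt (rows : List String) (col : Int) : String × List Int :=
  let st := pvGoB col rows
  (String.ofList st.1, st.2.1)

-- ===== PRECONDITION & SPEC =====
-- Pre_ excludes exactly the inputs where Python raises IndexError:
-- a negative col with some row shorter than |col| (row[col] out of range).
def Pre_column_extraction (rows : List String) (col : Int) : Prop :=
  ∀ r ∈ rows, col < 0 → 0 ≤ PySem.Str.len r + col
instance (rows : List String) (col : Int) : Decidable (Pre_column_extraction rows col) := by unfold Pre_column_extraction; infer_instance
def pvWitness_column_extraction : List String × Int := (["abc", "de", "xyzw"], 2)
def Spec_column_extraction (rows : List String) (col : Int) (out : String × List Int) : Prop := out = column_extraction_alt rows col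
instance (rows : List String) (col : Int) (out : String × List Int) : Decidable (Spec_column_extraction rows col out) := by unfold Spec_column_extraction; infer_instance

-- ===== CLAIM (what is proved, stated in full; the proofs are below) =====
def Claim_equal_column_extraction : Prop := ∀ (rows : List String) (col : Int), Dom_column_extraction rows col → Pre_column_extraction rows col → Spec_column_extraction rows col (column_extraction rows col)

-- ===== LEMMAS AND PROOFS =====

-- reference recursion: the list of (char, position) pairs taken from offset `off`
def pvPairs (col : Int) : List String → Int → List (Char × Int)
  | [], _ => []
  | r :: rs, off =>
    let rest := pvPairs col rs (off + PySem.Str.len r)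
    if col < PySem.Str.len r then
      match PySem.Str.pyGet? r col with
      | some c => (c, off + col) :: rest
      | none => rest
    else rest

theorem pvA_loop (col : Int) (rows : List String) :
    ∀ (cs : List Char) (ps : List Int) (off : Int),
      rows.foldl
        (fun (acc : List Char × List Int × Int) row =>
          let (chars, positions, offset) := acc
          if col < PySem.Str.len row then
            match PySem.Str.pyGet? row col with
            | some c => (chars ++ [c], positions ++ [offset + col], offset + PySem.Str.len row)
            | none => (chars, positions, offset + PySem.Str.len row)
          else (chars, positions, offset + PySem.Str.len row))
        (cs, ps, off)
      = (cs ++ (pvPairs col rows off).map Prod.fst,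
         ps ++ (pvPairs col rows off).map Prod.snd,
         off + (rows.map PySem.Str.len).sum) := by
  induction rows with
  | nil => intro cs ps off; simp [pvPairs]
  | cons r rs ih =>
    intro cs ps off
    simp only [List.foldl_cons, pvPairs]
    by_cases h : col < PySem.Str.len r
    · simp only [if_pos h]
      cases hg : PySem.Str.pyGet? r col with
      | some c =>
        rw [ih]
        simp [List.map_cons, List.append_assoc]
        ring
      | none =>
        rw [ih]
        simp
        ring
    · simp only [if_neg h]
      rw [ih]
      simp
      ring

-- shifting the starting offset shifts every position
theorem pvPairs_shift (col : Int) (rows : List String) :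
    ∀ (off : Int),
      pvPairs col rows off = (pvPairs col rows 0).map (fun p => (p.1, p.2 + off)) := by
  induction rows with
  | nil => intro off; simp [pvPairs]
  | cons r rs ih =>
    intro off
    simp only [pvPairs]
    by_cases h : col < PySem.Str.len r
    · simp only [if_pos h]
      cases hg : PySem.Str.pyGet? r col with
      | some c =>
        rw [ih (off + PySem.Str.len r), ih (0 + PySem.Str.len r)]
        simp [Function.comp]
        constructor
        · ring
        · intro a b hab; ring
      | none =>
        rw [ih (off + PySem.Str.len r), ih (0 + PySem.Str.len r)]
        simp [Function.comp]
        intro a b hab; ring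
    · simp only [if_neg h]
      rw [ih (off + PySem.Str.len r), ih (0 + PySem.Str.len r)]
      simp [Function.comp]
      intro a b hab; ring

theorem pvPairs_append (col : Int) (xs ys : List String) :
    ∀ (off : Int),
      pvPairs col (xs ++ ys) off
        = pvPairs col xs off ++ pvPairs col ys (off + (xs.map PySem.Str.len).sum) := by
  induction xs with
  | nil => intro off; simp [pvPairs]
  | cons x xs ih =>
    intro off
    simp only [List.cons_append, pvPairs]
    by_cases h : col < PySem.Str.len x
    · simp only [if_pos h]
      cases hg : PySem.Str.pyGet? x col with
      | some c => rw [ih]; simp; ring_nf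
      | none => rw [ih]; simp; ring_nf
    · simp only [if_neg h]
      rw [ih]; simp; ring_nf

-- B's helper computes exactly the reference pairs (relative, i.e. from offset 0)
theorem pvGoB_eq (col : Int) (rows : List String) :
    pvGoB col rows
      = ((pvPairs col rows 0).map Prod.fst,
         (pvPairs col rows 0).map Prod.snd,
         (rows.map PySem.Str.len).sum) := by
  fun_induction pvGoB col rows with
  | case1 => simp [pvPairs]
  | case2 r h c hc =>
    simp [PySem.Str.len] at h
    simp only [PySem.Str.pyGet?, PySem.Chars.pyGet?_eq_listPyGet?] at hc
    simp [pvPairs, PySem.Str.len, h, hc]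
  | case3 r h hg =>
    simp [PySem.Str.len] at h
    simp only [PySem.Str.pyGet?, PySem.Chars.pyGet?_eq_listPyGet?] at hg
    simp [pvPairs, PySem.Str.len, h, hg]
  | case4 r h =>
    simp [PySem.Str.len] at h
    simp [pvPairs, PySem.Str.len, h]
  | case5 r1 r2 rest mid cl pl ll hl cr pr lr hr ihl ihr =>
    rw [ihl] at hl
    rw [ihr] at hr
    injection hl with h1 hl'; injection hl' with h2 h3
    injection hr with h4 hr'; injection hr' with h5 h6
    subst h1 h2 h3 h4 h5 h6
    have hsplit := pvPairs_append col ((r1 :: r2 :: rest).take mid) ((r1 :: r2 :: rest).drop mid) 0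
    rw [List.take_append_drop] at hsplit
    rw [hsplit,
      pvPairs_shift col ((r1 :: r2 :: rest).drop mid)
        (0 + (((r1 :: r2 :: rest).take mid).map PySem.Str.len).sum)]
    have hsum : ((List.map PySem.Str.len (r1 :: r2 :: rest))).sum
        = (((r1 :: r2 :: rest).take mid).map PySem.Str.len).sum
          + (((r1 :: r2 :: rest).drop mid).map PySem.Str.len).sum := by
      conv_lhs => rw [← List.take_append_drop mid (r1 :: r2 :: rest)]
      simp
    rw [hsum]
    simp [Function.comp]

-- ===== VERDICT (by name: the statement is the Claim_ definition above) =====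
theorem column_extraction_spec : Claim_equal_column_extraction := by
  intro rows col _ _
  unfold Spec_column_extraction column_extraction column_extraction_alt
  simp only [pvA_loop col rows [] [] 0, pvGoB_eq]
  simp
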